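-- pv_equiv track=rewrite | github.com/phoeniex/Papyrus | platform_extractor.py | replace_trimed_space
-- ===== SOURCE A (Python) =====
-- def replace_trimed_space(string):
--     replaced_string = ''
--
--     start_of_text_content = 0
--     for index, char in enumerate(string):
--         if not char.isspace():
--             start_of_text_content = index
--             break
--
--     if start_of_text_content > 0:
--         replaced_string = ('&#160;' * start_of_text_content) + string[start_of_text_content:]
--     else:
--         replaced_string = string
--
--     end_of_text_content = 0
--     for index, char in enumerate(replaced_string[::-1]):
--         if not char.isspace():
--             end_of_text_content = index
--             break
--
--     if end_of_text_content > 0: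
--         replaced_string = replaced_string[: end_of_text_content * -1] + ('&#160;' * end_of_text_content)
--
--     return replaced_string
-- ===== SOURCE B (Python) =====
-- def replace_trimed_space(string):
--     idx = [i for i, c in enumerate(string) if not c.isspace()]
--     if not idx:
--         return string
--     first, last = idx[0], idx[-1]
--     return ''.join('&#160;' if i < first or i > last else c
--                    for i, c in enumerate(string))
-- ===== Notes on version B (the rewrite author's own statement) =====
-- stated objective: alternative
-- what changed: Instead of A's scan-then-slice-and-concatenate passes, B collects the list of non-whitespace positions, takes its first and last element, and rebuilds the string by mapping every character position to either an nbsp entity (outside [first,last]) or the original character; empty index list means all-whitespace and the string is returned unchanged like A.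
import Mathlib
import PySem

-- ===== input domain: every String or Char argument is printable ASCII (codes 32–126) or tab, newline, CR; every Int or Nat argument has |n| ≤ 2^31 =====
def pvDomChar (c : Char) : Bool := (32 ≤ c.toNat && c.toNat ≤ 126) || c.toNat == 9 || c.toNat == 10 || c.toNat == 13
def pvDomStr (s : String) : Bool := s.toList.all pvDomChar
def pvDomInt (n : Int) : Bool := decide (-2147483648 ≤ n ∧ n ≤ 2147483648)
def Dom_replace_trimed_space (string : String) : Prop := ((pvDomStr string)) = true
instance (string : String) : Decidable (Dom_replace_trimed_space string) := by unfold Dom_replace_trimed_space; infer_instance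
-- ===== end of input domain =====

-- B drops A's scan/slice/concatenate passes for an index-based rebuild: collect the
-- non-whitespace positions, then map every position to an nbsp entity or its own char.

-- ===== PORT A =====
-- A's loop 'for index, char in enumerate(...): if not char.isspace(): <var> = index; break'
-- (run twice by A, with <var> initialised to 0)
def pvScanA : List (Int × Char) → Int
  | [] => 0
  | (i, c) :: rest => if !(PySem.Chars.isspace c) then i else pvScanA rest

def replace_trimed_space (string : String) : String :=
  let s := string.toList
  let start := pvScanA (PySem.List.enumerate s 0)
  let replaced := if start > 0
    then PySem.List.pyRepeat "&#160;".toList start ++ PySem.List.slice s (some start) none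
    else s
  let endc := pvScanA (PySem.List.enumerate replaced.reverse 0)
  let replaced2 := if endc > 0
    then PySem.List.slice replaced none (some (endc * -1)) ++ PySem.List.pyRepeat "&#160;".toList endc
    else replaced
  String.ofList replaced2

-- ===== PORT B =====
def replace_trimed_space_alt (string : String) : String :=
  let s := string.toList
  -- idx = [i for i, c in enumerate(string) if not c.isspace()]
  let idx := (PySem.List.enumerate s 0).filterMap
    (fun p => if !(PySem.Chars.isspace p.2) then some p.1 else none)
  if h : idx = [] then string
  else
    let first := idx.head h        -- idx[0]
    let last := idx.getLast h      -- idx[-1]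
    -- ''.join('&#160;' if i < first or i > last else c for i, c in enumerate(string))
    String.ofList ((PySem.List.enumerate s 0).flatMap
      (fun p => if p.1 < first || p.1 > last then "&#160;".toList else [p.2]))

-- ===== PRECONDITION & SPEC =====
def Spec_replace_trimed_space (string : String) (out : String) : Prop := out = replace_trimed_space_alt string
instance (string : String) (out : String) : Decidable (Spec_replace_trimed_space string out) := by unfold Spec_replace_trimed_space; infer_instance

-- ===== CLAIM (what is proved, stated in full; the proofs are below) =====
def Claim_equal_replace_trimed_space : Prop := ∀ (string : String), Dom_replace_trimed_space string → Spec_replace_trimed_space string (replace_trimed_space string)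

-- ===== LEMMAS AND PROOFS =====

-- A's scan loop returns the index of the first non-whitespace char (0 if there is none)
theorem pvScanA_enumerate (s : List Char) (k : Int) :
    pvScanA (PySem.List.enumerate s k) =
      if PySem.Chars.lstrip s = [] then 0
      else k + ((s.takeWhile PySem.Chars.isspace).length : Int) := by
  induction s generalizing k with
  | nil => simp [PySem.List.enumerate, pvScanA, PySem.Chars.lstrip]
  | cons c cs ih =>
    rw [PySem.List.enumerate_cons]
    by_cases h : PySem.Chars.isspace c
    · simp [pvScanA, h, PySem.Chars.lstrip, ih]
      split_ifs with h2
      · rfl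
      · ring
    · simp [pvScanA, h, PySem.Chars.lstrip]

theorem drop_takeWhile (p : Char → Bool) (l : List Char) :
    l.drop (l.takeWhile p).length = l.dropWhile p := by
  induction l with
  | nil => simp
  | cons a l ih => by_cases h : p a <;> simp [h, ih]

theorem rstrip_eq_take (xs : List Char) :
    PySem.Chars.rstrip xs =
      xs.take (xs.length - (xs.reverse.takeWhile PySem.Chars.isspace).length) := by
  unfold PySem.Chars.rstrip
  rw [← drop_takeWhile, List.reverse_drop]
  simp

theorem takeWhile_append_left (p : Char → Bool) (a b : List Char) (h : ∃ x ∈ a, ¬ p x = true) :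
    (a ++ b).takeWhile p = a.takeWhile p := by
  induction a with
  | nil => obtain ⟨x, hx, _⟩ := h; simp at hx
  | cons c cs ih =>
    by_cases hc : p c
    · obtain ⟨x, hx, hpx⟩ := h
      rcases List.mem_cons.mp hx with rfl | hxs
      · exact absurd hc hpx
      · simp [hc, ih ⟨x, hxs, hpx⟩]
    · simp [hc]

-- the index comprehension over an all-whitespace list is empty
theorem filterMap_enum_allspace (xs : List Char) (k : Int)
    (h : ∀ x ∈ xs, PySem.Chars.isspace x) :
    (PySem.List.enumerate xs k).filterMap
      (fun p => if !(PySem.Chars.isspace p.2) then some p.1 else none) = [] := by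
  induction xs generalizing k with
  | nil => simp [PySem.List.enumerate]
  | cons c cs ih =>
    have hc := h c (by simp)
    rw [PySem.List.enumerate_cons]
    simp only [List.filterMap_cons, hc, Bool.not_true, Bool.false_eq_true, if_neg,
      reduceCtorEq, not_false_eq_true]
    exact ih _ (fun x hx => h x (by simp [hx]))

-- segment that maps constantly to w
theorem flatMap_eq_flatten_replicate {α β : Type} (l : List α) (f : α → List β) (w : List β)
    (h : ∀ p ∈ l, f p = w) :
    l.flatMap f = (List.replicate l.length w).flatten := by
  induction l with
  | nil => simp
  | cons a l ih =>
    simp [List.flatMap_cons, h a (by simp), ih (fun p hp => h p (by simp [hp])),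
      List.replicate_succ]

-- segment that keeps its own characters
theorem flatMap_eq_map_snd (l : List (Int × Char)) (f : Int × Char → List Char)
    (h : ∀ p ∈ l, f p = [p.2]) :
    l.flatMap f = l.map (·.2) := by
  induction l with
  | nil => simp
  | cons a l ih =>
    simp [List.flatMap_cons, h a (by simp), ih (fun p hp => h p (by simp [hp]))]

-- A's value in the generic (not all-whitespace) case: nbsp*lead ++ core ++ nbsp*trail
theorem A_eq (string : String)
    (hall : PySem.Chars.lstrip string.toList ≠ []) :
    replace_trimed_space string = String.ofList
      (PySem.List.pyRepeat "&#160;".toList ((string.toList.takeWhile PySem.Chars.isspace).length : Int)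
        ++ PySem.Chars.rstrip (string.toList.dropWhile PySem.Chars.isspace)
        ++ PySem.List.pyRepeat "&#160;".toList
            ((((string.toList.dropWhile PySem.Chars.isspace).reverse.takeWhile PySem.Chars.isspace).length : Int))) := by
  simp only [replace_trimed_space]
  set s := string.toList with hs
  have hex : ∃ x ∈ s, ¬ PySem.Chars.isspace x = true := by
    by_contra hc
    push_neg at hc
    exact hall (by simp [PySem.Chars.lstrip, List.dropWhile_eq_nil_iff]; simpa using hc)
  obtain ⟨x0, hx0s, hx0⟩ := hex
  set lead := (s.takeWhile PySem.Chars.isspace).length with hlead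
  set rest := s.dropWhile PySem.Chars.isspace with hrest
  have hsplit : s.takeWhile PySem.Chars.isspace ++ rest = s := List.takeWhile_append_dropWhile
  have hx0rest : x0 ∈ rest := by
    rcases (List.mem_append.mp (hsplit ▸ hx0s)) with h1 | h1
    · exact absurd (List.mem_takeWhile_imp h1) hx0
    · exact h1
  have hscan1 : pvScanA (PySem.List.enumerate s 0) = (lead : Int) := by
    rw [pvScanA_enumerate, if_neg hall, hlead]; simp
  have hrepl : (if (lead : Int) > 0
      then PySem.List.pyRepeat "&#160;".toList (lead : Int) ++ PySem.List.slice s (some (lead : Int)) none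
      else s) = PySem.List.pyRepeat "&#160;".toList (lead : Int) ++ rest := by
    split_ifs with hl
    · rw [PySem.List.slice_from_natCast, hrest, ← drop_takeWhile]
    · have h0 : lead = 0 := by omega
      have hr : rest = s := by rw [hrest, ← drop_takeWhile, ← hlead, h0, List.drop_zero]
      simp [h0, PySem.List.pyRepeat, hr]
  rw [hscan1, hrepl]
  set nb := PySem.List.pyRepeat "&#160;".toList (lead : Int) with hnb
  set trail := (rest.reverse.takeWhile PySem.Chars.isspace).length with htrail
  have hx0rev : x0 ∈ rest.reverse := List.mem_reverse.mpr hx0rest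
  have hlrev : PySem.Chars.lstrip (nb ++ rest).reverse ≠ [] := by
    simp only [PySem.Chars.lstrip, ne_eq, List.dropWhile_eq_nil_iff]
    intro hcontra
    exact hx0 (hcontra x0 (by simp [hx0rest]))
  have htw : ((nb ++ rest).reverse.takeWhile PySem.Chars.isspace).length = trail := by
    rw [List.reverse_append, takeWhile_append_left _ _ _ ⟨x0, hx0rev, hx0⟩, htrail]
  have hscan2 : pvScanA (PySem.List.enumerate (nb ++ rest).reverse 0) = (trail : Int) := by
    rw [pvScanA_enumerate, if_neg hlrev, htw]; simp
  rw [hscan2]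
  have htraillen : trail ≤ rest.length := by
    rw [htrail]
    simpa using (List.takeWhile_sublist (l := rest.reverse) (p := PySem.Chars.isspace)).length_le
  have hrst : PySem.Chars.rstrip rest = rest.take (rest.length - trail) := by
    rw [rstrip_eq_take, htrail]
  have hfinal : (if (trail : Int) > 0
      then PySem.List.slice (nb ++ rest) none (some ((trail : Int) * -1)) ++ PySem.List.pyRepeat "&#160;".toList (trail : Int)
      else nb ++ rest)
      = nb ++ PySem.Chars.rstrip rest ++ PySem.List.pyRepeat "&#160;".toList (trail : Int) := by
    split_ifs with ht
    · have ht' : 0 < trail := by omega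
      have hneg : (trail : Int) * -1 = -(trail : Int) := by ring
      rw [hneg, PySem.List.slice_to_neg_natCast _ _ ht']
      have hlen : (nb ++ rest).length - trail = nb.length + (rest.length - trail) := by
        simp [List.length_append]; omega
      rw [hlen, List.take_append, hrst]
      simp
    · have h0 : trail = 0 := by omega
      simp [h0, PySem.List.pyRepeat, hrst]
  rw [hfinal]

-- B's value in the generic case: the same decomposition
theorem B_eq (string : String)
    (hall : PySem.Chars.lstrip string.toList ≠ []) :
    replace_trimed_space_alt string = String.ofList
      (PySem.List.pyRepeat "&#160;".toList ((string.toList.takeWhile PySem.Chars.isspace).length : Int)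
        ++ PySem.Chars.rstrip (string.toList.dropWhile PySem.Chars.isspace)
        ++ PySem.List.pyRepeat "&#160;".toList
            ((((string.toList.dropWhile PySem.Chars.isspace).reverse.takeWhile PySem.Chars.isspace).length : Int))) := by
  simp only [replace_trimed_space_alt]
  set s := string.toList with hs
  set pre := s.takeWhile PySem.Chars.isspace with hpre
  set rest := s.dropWhile PySem.Chars.isspace with hrest
  have hsplit : pre ++ rest = s := List.takeWhile_append_dropWhile
  set mid := PySem.Chars.rstrip rest with hmid
  set suf := (rest.reverse.takeWhile PySem.Chars.isspace).reverse with hsuf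
  have hrestsplit : mid ++ suf = rest := by
    rw [hmid, hsuf, PySem.Chars.rstrip, ← List.reverse_append,
      List.takeWhile_append_dropWhile, List.reverse_reverse]
  have hrestne : rest ≠ [] := by
    rw [hrest]; exact hall
  have hheadrest : PySem.Chars.isspace (rest.head hrestne) = false :=
    List.head_dropWhile_not PySem.Chars.isspace (l := s) hrestne
  have hmidrevne : List.dropWhile PySem.Chars.isspace rest.reverse ≠ [] := by
    rw [ne_eq, List.dropWhile_eq_nil_iff]
    intro hcontra
    have := hcontra (rest.head hrestne) (by simp [List.head_mem])
    rw [hheadrest] at this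
    exact Bool.false_ne_true this
  have hmidne : mid ≠ [] := by
    rw [hmid, PySem.Chars.rstrip, ne_eq, List.reverse_eq_nil_iff]
    exact hmidrevne
  have hmidlast : PySem.Chars.isspace (mid.getLast hmidne) = false := by
    show PySem.Chars.isspace
      ((List.dropWhile PySem.Chars.isspace rest.reverse).reverse.getLast hmidne) = false
    rw [List.getLast_reverse]
    exact List.head_dropWhile_not _ _
  have hmidhead : PySem.Chars.isspace (mid.head hmidne) = false := by
    have h2 : rest.head? = some (mid.head hmidne) := by
      rw [← hrestsplit]
      rcases List.exists_cons_of_ne_nil hmidne with ⟨c, cs, hc⟩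
      simp [hc]
    have h3 : rest.head? = some (rest.head hrestne) := List.head?_eq_head hrestne
    rw [h3] at h2
    rw [← Option.some_inj.mp h2]
    exact hheadrest
  have hpresp : ∀ x ∈ pre, PySem.Chars.isspace x := fun x hx => List.mem_takeWhile_imp hx
  have hsufsp : ∀ x ∈ suf, PySem.Chars.isspace x := by
    intro x hx
    rw [hsuf, List.mem_reverse] at hx
    exact List.mem_takeWhile_imp hx
  -- split enumerate into the three regions
  have e1 : PySem.List.enumerate s 0
      = PySem.List.enumerate pre 0
        ++ (PySem.List.enumerate mid ((pre.length : Int))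
            ++ PySem.List.enumerate suf ((pre.length : Int) + (mid.length : Int))) := by
    conv_lhs => rw [← hsplit, ← hrestsplit]
    rw [PySem.List.enumerate_append, PySem.List.enumerate_append]
    simp
  set L : Int := (pre.length : Int) with hL
  set M : Int := (mid.length : Int) with hM
  -- the index comprehension reduces to the middle region
  have hidx : (PySem.List.enumerate s 0).filterMap
      (fun p => if !(PySem.Chars.isspace p.2) then some p.1 else none)
      = (PySem.List.enumerate mid L).filterMap
      (fun p => if !(PySem.Chars.isspace p.2) then some p.1 else none) := by
    rw [e1, List.filterMap_append, List.filterMap_append,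
      filterMap_enum_allspace _ _ hpresp, filterMap_enum_allspace _ _ hsufsp]
    simp
  set idxm := (PySem.List.enumerate mid L).filterMap
      (fun p => if !(PySem.Chars.isspace p.2) then some p.1 else none) with hidxm
  have hhead? : idxm.head? = some L := by
    obtain ⟨c, cs, hcons⟩ := List.exists_cons_of_ne_nil hmidne
    have hc : PySem.Chars.isspace c = false := by
      have : mid.head hmidne = c := by simp [hcons]
      rw [← this]; exact hmidhead
    rw [hidxm, hcons, PySem.List.enumerate_cons, List.filterMap_cons]
    simp [hc]
  have hne : idxm ≠ [] := by
    intro hcontra; rw [hcontra] at hhead?; simp at hhead?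
  have hgetLast? : idxm.getLast? = some (L + M - 1) := by
    have hconcat : mid.dropLast ++ [mid.getLast hmidne] = mid := List.dropLast_append_getLast hmidne
    have hlen : mid.dropLast.length = mid.length - 1 := by simp
    rw [hidxm]
    conv_lhs => rw [← hconcat]
    rw [PySem.List.enumerate_append, List.filterMap_append]
    have hsing : (PySem.List.enumerate [mid.getLast hmidne] (L + (mid.dropLast.length : Int))).filterMap
        (fun p => if !(PySem.Chars.isspace p.2) then some p.1 else none)
        = [L + (mid.dropLast.length : Int)] := by
      rw [PySem.List.enumerate_cons]
      simp [PySem.List.enumerate, hmidlast]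
    rw [hsing, List.getLast?_concat]
    have hmpos : 0 < mid.length := List.length_pos_of_ne_nil hmidne
    have hdl : ((mid.dropLast.length : Nat) : Int) = M - 1 := by rw [hM, hlen]; omega
    rw [hdl]
    congr 1
    ring
  rw [hidx, dif_neg hne]
  have hfirst : idxm.head hne = L := by
    have := List.head?_eq_head (l := idxm) hne
    rw [hhead?] at this
    exact (Option.some_inj.mp this).symm
  have hlast : idxm.getLast hne = L + M - 1 := by
    have := List.getLast?_eq_getLast (l := idxm) hne
    rw [hgetLast?] at this
    exact (Option.some_inj.mp this).symm
  rw [hfirst, hlast]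
  -- now the character map, region by region
  have hmpos : 0 < mid.length := List.length_pos_of_ne_nil hmidne
  rw [e1, List.flatMap_append, List.flatMap_append]
  have hpreseg : (PySem.List.enumerate pre 0).flatMap
      (fun p => if p.1 < L || p.1 > L + M - 1 then "&#160;".toList else [p.2])
      = (List.replicate pre.length "&#160;".toList).flatten := by
    rw [flatMap_eq_flatten_replicate _ _ "&#160;".toList ?_, PySem.List.length_enumerate]
    intro p hp
    obtain ⟨k, hk, hpk⟩ := (PySem.List.mem_enumerate_iff _ _ _).mp hp
    subst hpk
    have h1 : (0 : Int) + (k : Nat) < L := by rw [hL]; push_cast; omega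
    simp only [Bool.or_eq_true, decide_eq_true_eq]
    rw [if_pos (Or.inl h1)]
  have hmidseg : (PySem.List.enumerate mid L).flatMap
      (fun p => if p.1 < L || p.1 > L + M - 1 then "&#160;".toList else [p.2])
      = mid := by
    rw [flatMap_eq_map_snd _ _ ?_, PySem.List.map_snd_enumerate]
    intro p hp
    obtain ⟨k, hk, hpk⟩ := (PySem.List.mem_enumerate_iff _ _ _).mp hp
    subst hpk
    have h1 : ¬ (L + ((k : Nat) : Int) < L) := by omega
    have h2 : ¬ (L + ((k : Nat) : Int) > L + M - 1) := by rw [hM]; push_cast; omega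
    simp only [Bool.or_eq_true, decide_eq_true_eq]
    rw [if_neg (not_or.mpr ⟨h1, h2⟩)]
  have hsufseg : (PySem.List.enumerate suf (L + M)).flatMap
      (fun p => if p.1 < L || p.1 > L + M - 1 then "&#160;".toList else [p.2])
      = (List.replicate suf.length "&#160;".toList).flatten := by
    rw [flatMap_eq_flatten_replicate _ _ "&#160;".toList ?_, PySem.List.length_enumerate]
    intro p hp
    obtain ⟨k, hk, hpk⟩ := (PySem.List.mem_enumerate_iff _ _ _).mp hp
    subst hpk
    have h2 : L + M + ((k : Nat) : Int) > L + M - 1 := by omega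
    simp only [Bool.or_eq_true, decide_eq_true_eq]
    rw [if_pos (Or.inr h2)]
  rw [hpreseg, hmidseg, hsufseg]
  -- identify with the pyRepeat form
  congr 1
  have hsuflen : suf.length = (rest.reverse.takeWhile PySem.Chars.isspace).length := by
    rw [hsuf, List.length_reverse]
  rw [PySem.List.pyRepeat, PySem.List.pyRepeat, Int.toNat_natCast, Int.toNat_natCast, hsuflen,
    ← List.append_assoc]

theorem main_eq (string : String) :
    replace_trimed_space string = replace_trimed_space_alt string := by
  by_cases hall : PySem.Chars.lstrip string.toList = []
  · -- all-whitespace (or empty): both sides return the string unchanged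
    have hall' : ∀ x ∈ string.toList, PySem.Chars.isspace x := by
      simpa [PySem.Chars.lstrip, List.dropWhile_eq_nil_iff] using hall
    have hrev : PySem.Chars.lstrip string.toList.reverse = [] := by
      simp only [PySem.Chars.lstrip, List.dropWhile_eq_nil_iff]
      intro x hx; exact hall' x (by simpa using hx)
    have hA : replace_trimed_space string = string := by
      simp only [replace_trimed_space]
      simp only [pvScanA_enumerate, hall, hrev, if_true, gt_iff_lt, lt_irrefl, if_false]
      simp
    have hB : replace_trimed_space_alt string = string := by
      simp only [replace_trimed_space_alt]
      rw [dif_pos (filterMap_enum_allspace _ _ hall')]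
    rw [hA, hB]
  · rw [A_eq string hall, B_eq string hall]

-- ===== VERDICT (by name: the statement is the Claim_ definition above) =====
theorem replace_trimed_space_spec : Claim_equal_replace_trimed_space := by
  intro string _
  unfold Spec_replace_trimed_space
  exact main_eq string
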